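-- pv_equiv track=rewrite | github.com/vterreno/ejercicios-curso-python | Ejercicios/Ejercicio #1/resoluciónProfes.py | separarNumeros
-- ===== SOURCE A (Python) =====
-- def separarNumeros(cadena):
--     nums = 0
--     for i in range(len(cadena)):
--         if cadena[i] == " " or i == len(cadena) - 1:
--             nums += 1
--     vector = [""] * nums
--     indice = 0
--     for i in range(len(cadena)):
--         if cadena[i] != " ":
--             vector[indice] += cadena[i]
--         if cadena[i] == " " or i == (len(cadena) - 1):
--             indice += 1
--     return vector
-- ===== SOURCE B (Python) =====
-- def separarNumeros(cadena):
--     resultado = []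
--     token = ""
--     for i, c in enumerate(cadena):
--         if c != " ":
--             token += c
--         if c == " " or i == len(cadena) - 1:
--             resultado.append(token)
--             token = ""
--     return resultado
-- ===== Notes on version B (the rewrite author's own statement) =====
-- stated objective: faster
-- what changed: B builds the token list in one pass with a local string accumulator, replacing A's two passes (a counting pass plus a preallocated index-based fill whose vector[indice] += c rebuilds the slot string on every character).
import Mathlib
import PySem

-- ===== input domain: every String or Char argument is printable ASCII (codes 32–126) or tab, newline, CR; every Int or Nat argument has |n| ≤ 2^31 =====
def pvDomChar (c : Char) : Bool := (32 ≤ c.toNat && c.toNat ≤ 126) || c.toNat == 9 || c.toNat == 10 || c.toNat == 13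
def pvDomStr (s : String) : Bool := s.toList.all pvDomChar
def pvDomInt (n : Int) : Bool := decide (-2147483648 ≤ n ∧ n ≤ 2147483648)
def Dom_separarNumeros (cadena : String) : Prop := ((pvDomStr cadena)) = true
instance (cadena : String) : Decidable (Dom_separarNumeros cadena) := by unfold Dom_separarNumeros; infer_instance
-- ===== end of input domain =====

-- B replaces A's two passes (count, then preallocate-and-fill-by-index) with one accumulator pass; same return value.

-- ===== PORT A =====
-- Tokens are kept as List Char and turned into String at the end (exact: Python str concatenation = list append here).
-- "vector[indice] += c": recursive in-place update at index (index is always in range when A runs, so no-op branch is unreachable).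
def pvSetAppendA (v : List (List Char)) (i : Nat) (c : Char) : List (List Char) :=
  match v, i with
  | [], _ => []
  | x :: xs, 0 => (x ++ [c]) :: xs
  | x :: xs, Nat.succ j => x :: pvSetAppendA xs j c

-- first loop: count nums; "i == len(cadena)-1" is "rest = []" in the structural traversal
def pvCountA (cs : List Char) : Nat :=
  match cs with
  | [] => 0
  | c :: rest => if c = ' ' ∨ rest = [] then 1 + pvCountA rest else pvCountA rest

-- second loop: fill the preallocated vector, state (vector, indice)
def pvFillA (cs : List Char) (vector : List (List Char)) (indice : Nat) : List (List Char) :=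
  match cs with
  | [] => vector
  | c :: rest =>
      let v' := if c ≠ ' ' then pvSetAppendA vector indice c else vector
      if c = ' ' ∨ rest = [] then pvFillA rest v' (indice + 1) else pvFillA rest v' indice

def separarNumeros (cadena : String) : List String :=
  (pvFillA cadena.toList (List.replicate (pvCountA cadena.toList) []) 0).map String.ofList

-- ===== PORT B =====
-- single pass, state (resultado, token)
def pvLoopB (cs : List Char) (resultado : List (List Char)) (token : List Char) : List (List Char) :=
  match cs with
  | [] => resultado
  | c :: rest =>
      let token' := if c ≠ ' ' then token ++ [c] else token
      if c = ' ' ∨ rest = [] then pvLoopB rest (resultado ++ [token']) []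
      else pvLoopB rest resultado token'

def separarNumeros_alt (cadena : String) : List String :=
  (pvLoopB cadena.toList [] []).map String.ofList

-- ===== PRECONDITION & SPEC =====
def Spec_separarNumeros (cadena : String) (out : List String) : Prop := out = separarNumeros_alt cadena
instance (cadena : String) (out : List String) : Decidable (Spec_separarNumeros cadena out) := by unfold Spec_separarNumeros; infer_instance

-- ===== CLAIM (what is proved, stated in full; the proofs are below) =====
def Claim_equal_separarNumeros : Prop := ∀ (cadena : String), Dom_separarNumeros cadena → Spec_separarNumeros cadena (separarNumeros cadena)

-- ===== LEMMAS AND PROOFS =====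

theorem pvCountA_pos (cs : List Char) (h : cs ≠ []) : 1 ≤ pvCountA cs := by
  match cs with
  | c :: rest =>
      simp only [pvCountA]
      split
      · omega
      · rename_i hc
        rw [not_or] at hc
        exact pvCountA_pos rest hc.2

theorem pvSetAppendA_at (res : List (List Char)) (tok : List Char) (t : List (List Char)) (c : Char) :
    pvSetAppendA (res ++ tok :: t) res.length c = res ++ (tok ++ [c]) :: t := by
  induction res with
  | nil => simp [pvSetAppendA]
  | cons x xs ih => simp [pvSetAppendA, ih]

theorem pvFill_eq_loop (cs : List Char) (res : List (List Char)) (tok : List Char) (h : cs ≠ []) :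
    pvFillA cs (res ++ tok :: List.replicate (pvCountA cs - 1) []) res.length = pvLoopB cs res tok := by
  match cs with
  | c :: rest =>
    by_cases hrest : rest = []
    · subst hrest
      by_cases hc : c = ' ' <;>
        simp [pvFillA, pvLoopB, pvCountA, hc, pvSetAppendA_at]
    · have hpos := pvCountA_pos rest hrest
      by_cases hc : c = ' '
      · subst hc
        have hcnt : pvCountA (' ' :: rest) - 1 = pvCountA rest := by
          simp [pvCountA]
        have hrep : List.replicate (pvCountA rest) ([] : List Char)
            = [] :: List.replicate (pvCountA rest - 1) [] := by
          cases hn : pvCountA rest with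
          | zero => omega
          | succ k => simp [List.replicate]
        have ih := pvFill_eq_loop rest (res ++ [tok]) [] hrest
        rw [hcnt, hrep]
        simp [pvFillA, pvLoopB]
        simp only [List.append_assoc, List.cons_append, List.nil_append] at ih ⊢
        simpa [List.length_append] using ih
      · have hcnt : pvCountA (c :: rest) - 1 = pvCountA rest - 1 := by
          simp [pvCountA, hc, hrest]
        have ih := pvFill_eq_loop rest res (tok ++ [c]) hrest
        simp only [pvFillA, pvLoopB, hc, hrest, hcnt, or_self, if_false,
          pvSetAppendA_at, ne_eq, not_false_iff, if_true]
        simpa using ih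

-- ===== VERDICT (by name: the statement is the Claim_ definition above) =====
theorem separarNumeros_spec : Claim_equal_separarNumeros := by
  intro cadena _
  unfold Spec_separarNumeros separarNumeros separarNumeros_alt
  by_cases h : cadena.toList = []
  · simp [h, pvFillA, pvLoopB, pvCountA]
  · have hpos := pvCountA_pos cadena.toList h
    have hrep : List.replicate (pvCountA cadena.toList) ([] : List Char)
        = [] :: List.replicate (pvCountA cadena.toList - 1) [] := by
      cases hn : pvCountA cadena.toList with
      | zero => omega
      | succ k => simp [List.replicate]
    have := pvFill_eq_loop cadena.toList [] [] h
    simp only [List.nil_append, List.length_nil] at this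
    rw [hrep, this]
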